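-- pv_equiv track=rewrite | github.com/hecpabe/criptaritmetico | criptaritmetico2.py | getCharactersCodes
-- ===== SOURCE A (Python) =====
-- def getCharactersCodes(uniqueCharactersList, fixedCodes):
--
--     # Needed Variables
--     charactersCodes = []
--     fixedCodesValues = []
--     counter = 1
--
--     # Extract the fixed codes values
--     for key, value in fixedCodes.items():
--         fixedCodesValues.append(value)
--
--     # Add all codes less that ones that are fixed
--     for i in uniqueCharactersList:
--         if (counter not in fixedCodesValues):
--             charactersCodes.append(counter)
--         counter += 1
--
--     return charactersCodes
-- ===== SOURCE B (Python) =====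
-- def getCharactersCodes(uniqueCharactersList, fixedCodes):
--     n = len(uniqueCharactersList)
--     out = []
--     prev = 0
--     for v in sorted(set(fixedCodes.values())):
--         if v > n:
--             break
--         if v >= 1:
--             out.extend(range(prev + 1, v))
--             prev = v
--     out.extend(range(prev + 1, n + 1))
--     return out
-- ===== Notes on version B (the rewrite author's own statement) =====
-- stated objective: faster
-- what changed: Instead of testing each candidate 1..n for membership in the fixed-value list, B sorts the distinct fixed values once and emits the runs of free codes between consecutive blocked values (gap sweep with an early break), so there is no per-candidate membership test at all.
import Mathlib
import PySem

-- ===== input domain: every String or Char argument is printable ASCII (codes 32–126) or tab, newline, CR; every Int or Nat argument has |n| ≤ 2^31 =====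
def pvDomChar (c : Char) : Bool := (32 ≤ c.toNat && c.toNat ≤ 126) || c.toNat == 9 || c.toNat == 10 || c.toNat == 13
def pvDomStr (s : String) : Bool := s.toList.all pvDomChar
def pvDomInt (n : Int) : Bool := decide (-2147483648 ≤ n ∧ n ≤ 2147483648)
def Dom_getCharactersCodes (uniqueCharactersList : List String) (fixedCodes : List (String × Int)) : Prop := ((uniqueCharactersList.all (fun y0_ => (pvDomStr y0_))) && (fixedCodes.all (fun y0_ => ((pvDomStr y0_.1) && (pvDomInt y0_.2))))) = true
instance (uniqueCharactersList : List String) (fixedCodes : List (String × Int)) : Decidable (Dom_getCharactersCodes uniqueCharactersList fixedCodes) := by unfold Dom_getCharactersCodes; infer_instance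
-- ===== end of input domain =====

-- B replaces A's per-candidate membership scan by a gap-emitting sweep: it sorts the distinct
-- fixed values once and outputs the runs of free codes between consecutive blocked values
-- (faster: no membership test per candidate).


-- ===== PORT A =====
def getCharactersCodes (uniqueCharactersList : List String) (fixedCodes : List (String × Int)) : List Int :=
  -- for key, value in fixedCodes.items(): fixedCodesValues.append(value)
  let fixedCodesValues : List Int :=
    (PySem.Dict.items (PySem.Dict.mk fixedCodes)).foldl (fun acc kv => acc ++ [kv.2]) []
  -- for i in uniqueCharactersList: if counter not in fixedCodesValues: append; counter += 1
  let st := uniqueCharactersList.foldl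
    (fun (st : List Int × Int) _ =>
      (if st.2 ∉ fixedCodesValues then st.1 ++ [st.2] else st.1, st.2 + 1))
    (([] : List Int), (1 : Int))
  st.1

-- ===== PORT B =====
-- the for-loop over sorted(set(...)) with its 'break': recursion on the remaining blocked values
def pvEmitGaps (n : Int) : List Int → List Int → Int → List Int
  | [], out, prev => out ++ PySem.List.pyRange (prev + 1) (n + 1) 1
  | v :: rest, out, prev =>
    if v > n then out ++ PySem.List.pyRange (prev + 1) (n + 1) 1   -- break
    else if v ≥ 1 then pvEmitGaps n rest (out ++ PySem.List.pyRange (prev + 1) v 1) v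
    else pvEmitGaps n rest out prev

def getCharactersCodes_alt (uniqueCharactersList : List String) (fixedCodes : List (String × Int)) : List Int :=
  let n : Int := (uniqueCharactersList.length : Int)
  pvEmitGaps n
    (PySem.List.sorted (PySem.Set.ofList (PySem.Dict.values (PySem.Dict.mk fixedCodes))) (fun x => x) false)
    [] 0

-- ===== PRECONDITION & SPEC =====
def Spec_getCharactersCodes (uniqueCharactersList : List String) (fixedCodes : List (String × Int)) (out : List Int) : Prop := out = getCharactersCodes_alt uniqueCharactersList fixedCodes
instance (uniqueCharactersList : List String) (fixedCodes : List (String × Int)) (out : List Int) : Decidable (Spec_getCharactersCodes uniqueCharactersList fixedCodes out) := by unfold Spec_getCharactersCodes; infer_instance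

-- ===== CLAIM =====
def Claim_equal_getCharactersCodes : Prop := ∀ (uniqueCharactersList : List String) (fixedCodes : List (String × Int)), Dom_getCharactersCodes uniqueCharactersList fixedCodes → Spec_getCharactersCodes uniqueCharactersList fixedCodes (getCharactersCodes uniqueCharactersList fixedCodes)

-- ===== LEMMAS AND PROOFS =====

-- A's main loop, generalized: starting from (acc, c), it appends exactly the
-- counters c, c+1, …, c+len-1 that are not among the fixed values.
theorem loopA_eq_filter_pyRange (us : List String) (vals : List Int)
    (acc : List Int) (c : Int) :
    (us.foldl
      (fun (st : List Int × Int) _ =>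
        (if st.2 ∉ vals then st.1 ++ [st.2] else st.1, st.2 + 1)) (acc, c)).1
    = acc ++ (PySem.List.pyRange c (c + us.length) 1).filter (fun x => decide (x ∉ vals)) := by
  induction us generalizing acc c with
  | nil =>
    rw [show c + ((List.length ([]:List String) : Int)) = c by simp,
      PySem.List.pyRange_one_eq_nil (le_refl c)]
    simp
  | cons u us ih =>
    rw [List.foldl_cons, ih,
      PySem.List.pyRange_one_cons (by simp : c < c + ((u :: us).length : Int)),
      List.filter_cons]
    have harith : c + ((u :: us).length : Int) = (c + 1) + (us.length : Int) := by
      simp; omega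
    rw [harith]
    by_cases h : c ∈ vals
    · simp [h]
    · simp [h]

-- B's sweep, generalized: from state (out, prev), with the remaining blocked values L
-- strictly increasing and every admissible one beyond prev, it emits out followed by
-- the free codes of (prev, n].
theorem pvEmitGaps_eq_filter (n : Int) (L : List Int) (out : List Int) (prev : Int)
    (hprev : 0 ≤ prev) (hsort : L.Pairwise (· < ·))
    (hbig : ∀ v ∈ L, 1 ≤ v → prev < v) :
    pvEmitGaps n L out prev
    = out ++ (PySem.List.pyRange (prev + 1) (n + 1) 1).filter (fun x => decide (x ∉ L)) := by
  induction L generalizing out prev with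
  | nil => simp [pvEmitGaps]
  | cons v rest ih =>
    have hrest := (List.pairwise_cons.mp hsort).2
    have hvrest : ∀ w ∈ rest, v < w := (List.pairwise_cons.mp hsort).1
    rw [pvEmitGaps]
    by_cases hvn : v > n
    · -- break: no element of v :: rest lies in (prev, n]
      simp only [hvn, if_pos]
      have : ∀ x ∈ PySem.List.pyRange (prev + 1) (n + 1) 1, x ∉ v :: rest := by
        intro x hx
        have hxr := (PySem.List.mem_pyRange_one.mp hx).2
        intro hmem
        rcases List.mem_cons.mp hmem with h | h
        · omega
        · exact absurd hxr (by have := hvrest x h; omega)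
      rw [List.filter_eq_self.mpr (fun x hx => by simpa using this x hx)]
    · simp only [hvn, if_false]
      by_cases hv1 : v ≥ 1
      · simp only [hv1, if_pos]
        have hpv : prev < v := hbig v (List.mem_cons_self) hv1
        rw [ih (out ++ PySem.List.pyRange (prev + 1) v 1) v (by omega) hrest
            (fun w hw _ => hvrest w hw)]
        rw [List.append_assoc]
        congr 1
        -- split (prev, n] at v
        rw [PySem.List.pyRange_one_append (prev + 1) v (n + 1) (by omega) (by omega),
          List.filter_append]
        congr 1
        · -- below v: nothing blocked
          symm
          rw [List.filter_eq_self]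
          intro x hx
          have hxr := PySem.List.mem_pyRange_one.mp hx
          simp only [decide_eq_true_eq]
          intro hmem
          rcases List.mem_cons.mp hmem with h | h
          · omega
          · exact absurd hxr.2 (by have := hvrest x h; omega)
        · -- from v on: v itself is blocked, the rest only by rest
          rw [PySem.List.pyRange_one_cons (by omega : v < n + 1), List.filter_cons]
          rw [if_neg (by simp)]
          symm
          apply List.filter_congr
          intro x hx
          have hxr := PySem.List.mem_pyRange_one.mp hx
          simp only [decide_eq_decide, List.mem_cons, not_or]
          constructor
          · exact fun h => h.2
          · exact fun h => ⟨by omega, h⟩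
      · -- v < 1: v cannot occur in (prev, n] since prev ≥ 0
        simp only [hv1, if_false]
        rw [ih out prev hprev hrest (fun w hw h1 => hbig w (List.mem_cons_of_mem _ hw) h1)]
        congr 1
        apply List.filter_congr
        intro x hx
        have hxr := PySem.List.mem_pyRange_one.mp hx
        simp only [decide_eq_decide, List.mem_cons, not_or]
        constructor
        · exact fun h => ⟨by omega, h⟩
        · exact fun h => h.2

-- ===== VERDICT =====
theorem getCharactersCodes_spec : Claim_equal_getCharactersCodes := by
  intro u f _
  unfold Spec_getCharactersCodes getCharactersCodes getCharactersCodes_alt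
  simp only []
  rw [loopA_eq_filter_pyRange]
  have hvals : (PySem.Dict.items (PySem.Dict.mk f)).foldl (fun acc kv => acc ++ [kv.2]) ([] : List Int)
      = PySem.Dict.values (PySem.Dict.mk f) := by
    rw [PySem.List.foldl_append_singleton_eq_map]
    rfl
  rw [hvals]
  set vals := PySem.Dict.values (PySem.Dict.mk f) with hv
  rw [pvEmitGaps_eq_filter _ _ _ _ (le_refl 0)
    (PySem.List.sorted_ofList_pairwise_lt vals)
    (fun v _ h1 => by omega)]
  rw [List.nil_append]
  have h01 : (0 : Int) + 1 = 1 := by norm_num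
  rw [h01, show (1 : Int) + (u.length : Int) = (u.length : Int) + 1 by ring]
  apply List.filter_congr
  intro x _
  simp [PySem.List.mem_sorted, PySem.Set.mem_ofList]
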